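-- pv_equiv track=rewrite | github.com/nanaka-gouvea/biotec | src/spectrum_masses.py | convolution_map
-- ===== SOURCE A (Python) =====
-- def convolution_map(spec):
--     conv = {}
--     for ma in spec:
--         for mb in spec:
--             diff = ma - mb
--             if (diff >= 57) and (diff <= 200):
--                 try:
--                     conv[diff] += 1
--                 except KeyError:
--                     conv[diff] = 1
--     return conv
-- ===== SOURCE B (Python) =====
-- def convolution_map(spec):
--     cnt = {}
--     for x in spec:
--         cnt[x] = cnt.get(x, 0) + 1
--     uniq = list(dict.fromkeys(spec))
--     conv = {}
--     for a in uniq: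
--         for b in uniq:
--             d = a - b
--             if 57 <= d <= 200:
--                 conv[d] = conv.get(d, 0) + cnt[a] * cnt[b]
--     return conv
-- ===== Notes on version B (the rewrite author's own statement) =====
-- stated objective: alternative
-- what changed: B builds a frequency table once, dedups the masses preserving first occurrence, and adds count products cnt[a]*cnt[b] per distinct pair instead of incrementing the dict once per element pair; the returned dict (values and insertion order) is identical.
import Mathlib
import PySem

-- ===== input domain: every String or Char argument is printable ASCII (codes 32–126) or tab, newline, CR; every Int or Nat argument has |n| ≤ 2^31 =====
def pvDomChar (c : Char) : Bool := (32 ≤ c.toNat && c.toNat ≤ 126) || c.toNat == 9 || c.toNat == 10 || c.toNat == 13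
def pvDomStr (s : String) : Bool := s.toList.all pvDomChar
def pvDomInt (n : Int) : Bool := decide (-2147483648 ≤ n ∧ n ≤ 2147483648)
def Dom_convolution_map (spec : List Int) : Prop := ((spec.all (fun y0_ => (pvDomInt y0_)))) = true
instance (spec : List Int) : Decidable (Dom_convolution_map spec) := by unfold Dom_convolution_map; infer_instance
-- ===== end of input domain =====

-- B replaces A's pair-by-pair increments by a frequency table: it counts each mass once, dedups
-- the masses, and adds count products per distinct pair ('alternative' objective; the returned
-- dict, including insertion order, is identical).

-- ===== PORT A =====
def convolution_map (spec : List Int) : List (Int × Int) :=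
  (spec.foldl (fun conv ma =>
      spec.foldl (fun conv mb =>
          let diff := ma - mb
          if 57 ≤ diff ∧ diff ≤ 200 then
            match conv.get? diff with
            | some v => conv.insert diff (v + 1)
            | none => conv.insert diff 1
          else conv)
        conv)
    (PySem.Dict.empty : PySem.Dict Int Int)).items

-- ===== PORT B =====
def convolution_map_alt (spec : List Int) : List (Int × Int) :=
  let cnt : PySem.Dict Int Int :=
    spec.foldl (fun cnt x => cnt.insert x (cnt.getD x 0 + 1)) PySem.Dict.empty
  let uniq : List Int := PySem.List.dedup spec
  (uniq.foldl (fun conv a =>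
      uniq.foldl (fun conv b =>
          let d := a - b
          if 57 ≤ d ∧ d ≤ 200 then
            conv.insert d (conv.getD d 0 + cnt.getD a 0 * cnt.getD b 0)
          else conv)
        conv)
    (PySem.Dict.empty : PySem.Dict Int Int)).items

-- ===== PRECONDITION & SPEC =====
def Spec_convolution_map (spec : List Int) (out : List (Int × Int)) : Prop := out = convolution_map_alt spec
instance (spec : List Int) (out : List (Int × Int)) : Decidable (Spec_convolution_map spec out) := by unfold Spec_convolution_map; infer_instance

-- ===== CLAIM (what is proved, stated in full; the proofs are below) =====
def Claim_equal_convolution_map : Prop := ∀ (spec : List Int), Dom_convolution_map spec → Spec_convolution_map spec (convolution_map spec)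

-- ===== LEMMAS AND PROOFS =====
def pvDedupS (s : List Int) : List Int → List Int
  | [] => []
  | x :: xs => if x ∈ s then pvDedupS s xs else x :: pvDedupS (x :: s) xs

theorem pvDedupS_congr {s s' : List Int} (h : ∀ x, x ∈ s ↔ x ∈ s') :
    ∀ l, pvDedupS s l = pvDedupS s' l := by
  intro l
  induction l generalizing s s' with
  | nil => rfl
  | cons x xs ih =>
    simp only [pvDedupS]
    by_cases hx : x ∈ s
    · rw [if_pos hx, if_pos ((h x).mp hx)]; exact ih h
    · rw [if_neg hx, if_neg (fun hc => hx ((h x).mpr hc))]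
      refine congrArg _ (ih ?_)
      intro y; simp [List.mem_cons, h y]

theorem pvDedupS_append (s xs ys : List Int) :
    pvDedupS s (xs ++ ys) = pvDedupS s xs ++ pvDedupS (xs ++ s) ys := by
  induction xs generalizing s with
  | nil => simp [pvDedupS]
  | cons x xs ih =>
    simp only [List.cons_append, pvDedupS]
    by_cases hx : x ∈ s
    · simp only [if_pos hx]
      rw [ih]
      refine congrArg _ (pvDedupS_congr ?_ ys)
      intro y
      constructor
      · intro hy; exact List.mem_cons_of_mem _ hy
      · intro hy
        rcases List.mem_cons.mp hy with rfl | h1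
        · exact List.mem_append.mpr (Or.inr hx)
        · exact h1
    · simp only [if_neg hx, List.cons_append]
      rw [ih]
      refine congrArg _ (congrArg _ (pvDedupS_congr ?_ ys))
      intro y
      constructor
      · intro hy
        rcases List.mem_append.mp hy with h1 | h1
        · exact List.mem_cons_of_mem _ (List.mem_append.mpr (Or.inl h1))
        · rcases List.mem_cons.mp h1 with rfl | h2
          · exact List.mem_cons_self
          · exact List.mem_cons_of_mem _ (List.mem_append.mpr (Or.inr h2))
      · intro hy
        rcases List.mem_cons.mp hy with rfl | h1
        · exact List.mem_append.mpr (Or.inr List.mem_cons_self)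
        · rcases List.mem_append.mp h1 with h2 | h2
          · exact List.mem_append.mpr (Or.inl h2)
          · exact List.mem_append.mpr (Or.inr (List.mem_cons_of_mem _ h2))

theorem pvDedupS_nil_of_subset {s : List Int} : ∀ {l : List Int}, (∀ x ∈ l, x ∈ s) →
    pvDedupS s l = [] := by
  intro l
  induction l with
  | nil => intro _; rfl
  | cons x xs ih =>
    intro h
    simp only [pvDedupS, if_pos (h x (List.mem_cons_self))]
    exact ih (fun y hy => h y (List.mem_cons_of_mem _ hy))

theorem pvMem_dedupS (s l : List Int) (x : Int) :
    x ∈ pvDedupS s l ↔ x ∈ l ∧ x ∉ s := by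
  induction l generalizing s with
  | nil => simp [pvDedupS]
  | cons y ys ih =>
    by_cases hy : y ∈ s
    · simp only [pvDedupS, if_pos hy, ih]
      constructor
      · rintro ⟨h1, h2⟩; exact ⟨List.mem_cons_of_mem _ h1, h2⟩
      · rintro ⟨h1, h2⟩
        rcases List.mem_cons.mp h1 with rfl | h3
        · exact absurd hy h2
        · exact ⟨h3, h2⟩
    · simp only [pvDedupS, if_neg hy]
      constructor
      · intro h
        rcases List.mem_cons.mp h with rfl | h1
        · exact ⟨List.mem_cons_self, hy⟩
        · rcases (ih (y :: s)).mp h1 with ⟨h2, h3⟩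
          exact ⟨List.mem_cons_of_mem _ h2, fun hc => h3 (List.mem_cons_of_mem _ hc)⟩
      · rintro ⟨h1, h2⟩
        rcases List.mem_cons.mp h1 with rfl | h3
        · exact List.mem_cons_self
        · by_cases hxy : x = y
          · exact hxy ▸ List.mem_cons_self
          · refine List.mem_cons_of_mem _ ((ih (y :: s)).mpr ⟨h3, fun hc => ?_⟩)
            rcases List.mem_cons.mp hc with h4 | h4
            exacts [hxy h4, h2 h4]

theorem pvDedupS_dedupS {s t : List Int} (h : ∀ x ∈ t, x ∈ s) :
    ∀ l, pvDedupS s (pvDedupS t l) = pvDedupS s l := by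
  intro l
  induction l generalizing s t with
  | nil => rfl
  | cons x xs ih =>
    simp only [pvDedupS]
    by_cases hxt : x ∈ t
    · rw [if_pos hxt, if_pos (h x hxt)]; exact ih h
    · rw [if_neg hxt]
      by_cases hxs : x ∈ s
      · rw [if_pos hxs]
        simp only [pvDedupS, if_pos hxs]
        exact ih (by intro y hy; rcases List.mem_cons.mp hy with rfl | hy2
                     exacts [hxs, h y hy2])
      · rw [if_neg hxs]
        simp only [pvDedupS, if_neg hxs]
        refine congrArg _ (ih ?_)
        intro y hy; rcases List.mem_cons.mp hy with rfl | hy2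
        · exact List.mem_cons_self
        · exact List.mem_cons_of_mem _ (h y hy2)

theorem pvFilterMap_dedupS (h : Int → Option Int)
    (hinj : ∀ b b' d, h b = some d → h b' = some d → b = b') :
    ∀ (l t : List Int),
      List.filterMap h (pvDedupS t l) = pvDedupS (List.filterMap h t) (List.filterMap h l) := by
  intro l
  induction l with
  | nil => intro t; rfl
  | cons x xs ih =>
    intro t
    by_cases hx : x ∈ t
    · simp only [pvDedupS, if_pos hx, List.filterMap_cons]
      cases hhx : h x with
      | none => exact ih t
      | some d =>
        have hd : d ∈ List.filterMap h t := List.mem_filterMap.mpr ⟨x, hx, hhx⟩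
        simp only [pvDedupS, if_pos hd]
        exact ih t
    · simp only [pvDedupS, if_neg hx, List.filterMap_cons]
      cases hhx : h x with
      | none =>
        rw [ih (x :: t)]
        refine pvDedupS_congr ?_ _
        intro y
        simp only [List.filterMap_cons, hhx]
      | some d =>
        have hd : d ∉ List.filterMap h t := by
          intro hc
          rcases List.mem_filterMap.mp hc with ⟨b, hb, hbd⟩
          exact hx ((hinj x b d hhx hbd) ▸ hb)
        simp only [pvDedupS, if_neg hd]
        rw [ih (x :: t)]
        refine congrArg _ (pvDedupS_congr ?_ _)
        intro y
        simp only [List.filterMap_cons, hhx, List.mem_cons]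

theorem pvDedupS_flatMap_dedup (g : Int → List Int) :
    ∀ (l s t : List Int), (∀ a ∈ t, ∀ x ∈ g a, x ∈ s) →
      pvDedupS s (l.flatMap g) = pvDedupS s ((pvDedupS t l).flatMap g) := by
  intro l
  induction l with
  | nil => intro s t _; rfl
  | cons a l' ih =>
    intro s t hts
    by_cases hat : a ∈ t
    · simp only [List.flatMap_cons, pvDedupS, if_pos hat, pvDedupS_append]
      rw [pvDedupS_nil_of_subset (hts a hat), List.nil_append]
      rw [pvDedupS_congr (s := g a ++ s) (s' := s) (fun y => by
        constructor
        · intro hy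
          rcases List.mem_append.mp hy with h1 | h1
          exacts [hts a hat y h1, h1]
        · intro hy; exact List.mem_append.mpr (Or.inr hy))]
      exact ih s t hts
    · simp only [List.flatMap_cons, pvDedupS, if_neg hat, pvDedupS_append]
      refine congrArg _ (?_)
      rw [ih (g a ++ s) (a :: t) ?_]
      intro b hb x hxg
      rcases List.mem_cons.mp hb with rfl | hb2
      · exact List.mem_append.mpr (Or.inl hxg)
      · exact List.mem_append.mpr (Or.inr (hts b hb2 x hxg))

theorem pvDedupS_flatMap_congr (g g' : Int → List Int)
    (hg : ∀ a, g' a = pvDedupS [] (g a)) :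
    ∀ (l s : List Int), pvDedupS s (l.flatMap g) = pvDedupS s (l.flatMap g') := by
  intro l
  induction l with
  | nil => intro s; rfl
  | cons a l' ih =>
    intro s
    simp only [List.flatMap_cons, pvDedupS_append]
    have h1 : pvDedupS s (g' a) = pvDedupS s (g a) := by
      rw [hg a]; exact pvDedupS_dedupS (by intro x hx; cases hx) _
    have h2 : ∀ y, y ∈ g a ++ s ↔ y ∈ g' a ++ s := by
      intro y
      constructor
      · intro hy
        rcases List.mem_append.mp hy with hy1 | hy1
        · refine List.mem_append.mpr (Or.inl ?_)
          rw [hg a, pvMem_dedupS]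
          exact ⟨hy1, by simp⟩
        · exact List.mem_append.mpr (Or.inr hy1)
      · intro hy
        rcases List.mem_append.mp hy with hy1 | hy1
        · rw [hg a, pvMem_dedupS] at hy1
          exact List.mem_append.mpr (Or.inl hy1.1)
        · exact List.mem_append.mpr (Or.inr hy1)
    rw [h1, pvDedupS_congr h2 (l'.flatMap g), ih]

theorem pvFoldl_add_eq (l : List Int) :
    ∀ s : List Int, List.foldl PySem.Set.add s l = s ++ pvDedupS s l := by
  induction l with
  | nil => intro s; simp [pvDedupS]
  | cons x xs ih =>
    intro s
    simp only [List.foldl_cons, pvDedupS, PySem.Set.add]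
    by_cases hx : x ∈ s
    · have hc : PySem.Set.contains s x = true := by
        simp [PySem.Set.contains, hx]
      rw [if_pos hc, if_pos hx, ih]
    · have hc : ¬ PySem.Set.contains s x = true := by
        simp [PySem.Set.contains, hx]
      rw [if_neg hc, if_neg hx, ih]
      rw [pvDedupS_congr (s := s ++ [x]) (s' := x :: s) (fun y => by
        simp [List.mem_append, List.mem_cons, or_comm]) xs]
      simp

theorem pvOfList_eq_dedupS (l : List Int) : PySem.Set.ofList l = pvDedupS [] l := by
  rw [PySem.Set.ofList_eq_foldl, pvFoldl_add_eq]
  simp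

def pvUpd (c : PySem.Dict Int Int) (e : Int × Int) : PySem.Dict Int Int :=
  c.insert e.1 (c.getD e.1 0 + e.2)

def pvS (evs : List (Int × Int)) (k : Int) : Int :=
  (evs.map (fun e => if e.1 = k then e.2 else 0)).sum

theorem pvGetD_foldl_upd (evs : List (Int × Int)) :
    ∀ (c : PySem.Dict Int Int) (k : Int),
      (evs.foldl pvUpd c).getD k 0 = c.getD k 0 + pvS evs k := by
  induction evs with
  | nil => intro c k; simp [pvS]
  | cons e evs ih =>
    intro c k
    simp only [List.foldl_cons, ih, pvS, List.map_cons, List.sum_cons]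
    simp only [pvUpd, PySem.Dict.getD_insert]
    by_cases hk : k = e.1
    · subst hk; simp; ring
    · rw [if_neg hk, if_neg (fun hc => hk hc.symm)]
      simp only [pvS] at *
      ring

theorem pvKeys_foldl_upd (evs : List (Int × Int)) (c : PySem.Dict Int Int) :
    (evs.foldl pvUpd c).keys = PySem.Set.update c.keys (evs.map Prod.fst) := by
  have := PySem.Dict.keys_foldl_insert_key (ν := Int) evs Prod.fst
      (fun d e => d.getD e.1 0 + e.2) c
  simpa [pvUpd] using this

theorem pvNodup_keys_foldl_upd (evs : List (Int × Int)) :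
    ((evs.foldl pvUpd (PySem.Dict.empty : PySem.Dict Int Int))).keys.Nodup := by
  have := PySem.Dict.nodup_keys_foldl_insert_key (ν := Int) evs Prod.fst
      (fun d e => d.getD e.1 0 + e.2) PySem.Dict.empty (by simp [pysem])
  simpa [pvUpd] using this

theorem pvS_append (xs ys : List (Int × Int)) (k : Int) :
    pvS (xs ++ ys) k = pvS xs k + pvS ys k := by
  simp [pvS]

theorem pvS_flatMap (l : List Int) (g : Int → List (Int × Int)) (k : Int) :
    pvS (l.flatMap g) k = (l.map (fun a => pvS (g a) k)).sum := by
  induction l with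
  | nil => simp [pvS]
  | cons a l' ih => simp [List.flatMap_cons, pvS_append, ih]

theorem pvSum_filter_split (l : List Int) (p : Int → Bool) (g : Int → Int) :
    ((l.filter p).map g).sum + ((l.filter (fun x => !(p x))).map g).sum = (l.map g).sum := by
  induction l with
  | nil => simp
  | cons x xs ih =>
    by_cases hp : p x
    · simp only [List.filter_cons, if_pos hp, if_neg (by simp [hp] : ¬ (!(p x)) = true),
        List.map_cons, List.sum_cons]
      omega
    · simp only [List.filter_cons, if_neg (by simp [hp] : ¬ p x = true)]
      simp only [if_pos (by simp [hp] : (!(p x)) = true), List.map_cons, List.sum_cons]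
      omega

theorem pvSum_count (u : List Int) (hu : u.Nodup) :
    ∀ (l : List Int) (g : Int → Int), (∀ x ∈ l, x ∈ u) →
      (l.map g).sum = (u.map (fun a => (l.count a : Int) * g a)).sum := by
  induction u with
  | nil =>
    intro l g h
    cases l with
    | nil => simp
    | cons x xs => exact absurd (h x List.mem_cons_self) (by simp)
  | cons a u' ih =>
    intro l g h
    have hnd' : u'.Nodup := (List.nodup_cons.mp hu).2
    have hna : a ∉ u' := (List.nodup_cons.mp hu).1
    rw [← pvSum_filter_split l (fun x => x == a) g]
    have h1 : ((l.filter (fun x => x == a)).map g).sum = (l.count a : Int) * g a := by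
      rw [List.filter_beq, List.map_replicate, List.sum_replicate]
      simp
    have h2 : ((l.filter (fun x => !(x == a))).map g).sum =
        (u'.map (fun b => ((l.filter (fun x => !(x == a))).count b : Int) * g b)).sum := by
      refine ih hnd' _ g ?_
      intro x hx
      have hxl : x ∈ l := List.mem_of_mem_filter hx
      have hxa : ¬ (x == a) = true := by
        have := List.of_mem_filter hx; simpa using this
      rcases List.mem_cons.mp (h x hxl) with rfl | h3
      · simp at hxa
      · exact h3
    have h3 : ∀ b ∈ u', (l.filter (fun x => !(x == a))).count b = l.count b := by
      intro b hb
      refine List.count_filter ?_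
      have : b ≠ a := fun hc => hna (hc ▸ hb)
      simp [this]
    rw [h1, h2, List.map_cons, List.sum_cons]
    have h4 : (List.map (fun b => ((List.count b (List.filter (fun x => !x == a) l) : Int)) * g b) u') =
        (List.map (fun b => ((l.count b : Int)) * g b) u') := by
      refine List.map_congr_left ?_
      intro b hb
      rw [h3 b hb]
    rw [h4]

theorem pvS_cons (x w : Int) (evs : List (Int × Int)) (k : Int) :
    pvS ((x, w) :: evs) k = (if x = k then w else 0) + pvS evs k := by
  simp [pvS]

theorem pvS_blockA (spec : List Int) (a k : Int) :
    pvS (spec.filterMap (fun b =>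
        if 57 ≤ a - b ∧ a - b ≤ 200 then some (a - b, (1 : Int)) else none)) k =
      if 57 ≤ k ∧ k ≤ 200 then (spec.count (a - k) : Int) else 0 := by
  induction spec with
  | nil => simp [pvS]
  | cons b l ih =>
    rw [List.filterMap_cons]
    by_cases hP : 57 ≤ a - b ∧ a - b ≤ 200
    · rw [if_pos hP, pvS_cons, ih]
      by_cases hbk : a - b = k
      · simp only [if_pos hbk]
        have hb : b = a - k := by omega
        have hK : 57 ≤ k ∧ k ≤ 200 := by omega
        rw [if_pos hK, if_pos hK, List.count_cons]
        simp only [beq_iff_eq]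
        rw [if_pos (by omega : b = a - k)]
        push_cast
        ring
      · simp only [if_neg hbk]
        by_cases hK : 57 ≤ k ∧ k ≤ 200
        · rw [if_pos hK, if_pos hK, List.count_cons]
          simp only [beq_iff_eq]
          rw [if_neg (by omega : ¬ b = a - k)]
          push_cast
          ring
        · rw [if_neg hK, if_neg hK]; ring
    · rw [if_neg hP, ih]
      by_cases hK : 57 ≤ k ∧ k ≤ 200
      · rw [if_pos hK, if_pos hK, List.count_cons]
        simp only [beq_iff_eq]
        rw [if_neg (by omega : ¬ b = a - k)]
        push_cast
        ring
      · rw [if_neg hK, if_neg hK]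

theorem pvS_blockB (spec : List Int) (a k : Int) :
    pvS ((PySem.List.dedup spec).filterMap (fun b =>
        if 57 ≤ a - b ∧ a - b ≤ 200 then
          some (a - b, ((spec.count a : Int)) * ((spec.count b : Int))) else none)) k =
      if 57 ≤ k ∧ k ≤ 200 then (spec.count a : Int) * (spec.count (a - k) : Int) else 0 := by
  have hmemu : ∀ x, x ∈ PySem.List.dedup spec ↔ x ∈ spec := by
    intro x; rw [PySem.List.dedup_eq_ofList]; exact PySem.Set.mem_ofList spec x
  have hnd : (PySem.List.dedup spec).Nodup := by
    rw [PySem.List.dedup_eq_ofList]; exact PySem.Set.nodup_ofList spec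
  -- generalize over the deduped list
  have main : ∀ (u : List Int), u.Nodup → (∀ x, x ∈ u → x ∈ spec) →
      pvS (u.filterMap (fun b =>
        if 57 ≤ a - b ∧ a - b ≤ 200 then
          some (a - b, ((spec.count a : Int)) * ((spec.count b : Int))) else none)) k =
      if 57 ≤ k ∧ k ≤ 200 ∧ (a - k) ∈ u then
        (spec.count a : Int) * (spec.count (a - k) : Int) else 0 := by
    intro u
    induction u with
    | nil => intro _ _; simp [pvS]
    | cons b l ih =>
      intro hnd hsub
      have hnd' : l.Nodup := (List.nodup_cons.mp hnd).2
      have hbl : b ∉ l := (List.nodup_cons.mp hnd).1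
      rw [List.filterMap_cons]
      by_cases hP : 57 ≤ a - b ∧ a - b ≤ 200
      · rw [if_pos hP, pvS_cons, ih hnd' (fun x hx => hsub x (List.mem_cons_of_mem _ hx))]
        by_cases hbk : a - b = k
        · have hb : b = a - k := by omega
          have hK : 57 ≤ k ∧ k ≤ 200 := by omega
          rw [if_pos hbk, if_neg (by rw [← hb]; exact fun hc => hbl hc.2.2),
            if_pos ⟨hK.1, hK.2, by rw [← hb]; exact List.mem_cons_self⟩]
          rw [← hb]
          ring
        · rw [if_neg (by omega : ¬ a - b = k)]
          by_cases hK : 57 ≤ k ∧ k ≤ 200 ∧ (a - k) ∈ l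
          · rw [if_pos hK, if_pos ⟨hK.1, hK.2.1, List.mem_cons_of_mem _ hK.2.2⟩]; ring
          · rw [if_neg hK, if_neg (fun hc => hK ⟨hc.1, hc.2.1, by
              rcases List.mem_cons.mp hc.2.2 with h4 | h4
              · exact absurd (by omega : a - b = k) hbk
              · exact h4⟩)]
            ring
      · rw [if_neg hP, ih hnd' (fun x hx => hsub x (List.mem_cons_of_mem _ hx))]
        by_cases hK : 57 ≤ k ∧ k ≤ 200 ∧ (a - k) ∈ l
        · rw [if_pos hK, if_pos ⟨hK.1, hK.2.1, List.mem_cons_of_mem _ hK.2.2⟩]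
        · rw [if_neg hK, if_neg (fun hc => hK ⟨hc.1, hc.2.1, by
            rcases List.mem_cons.mp hc.2.2 with h4 | h4
            · exact absurd (by omega : 57 ≤ a - b ∧ a - b ≤ 200) hP
            · exact h4⟩)]
  rw [main _ hnd (fun x hx => (hmemu x).mp hx)]
  by_cases hK : 57 ≤ k ∧ k ≤ 200
  · by_cases hm : (a - k) ∈ PySem.List.dedup spec
    · rw [if_pos ⟨hK.1, hK.2, hm⟩, if_pos hK]
    · rw [if_neg (fun hc => hm hc.2.2), if_pos hK]
      have : spec.count (a - k) = 0 := by
        rw [List.count_eq_zero]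
        intro hc; exact hm ((hmemu _).mpr hc)
      rw [this]
      simp
  · rw [if_neg (fun hc => hK ⟨hc.1, hc.2.1⟩), if_neg hK]

def pvEv (l : List Int) (w : Int → Int → Int) : List (Int × Int) :=
  l.flatMap (fun a => l.filterMap (fun b =>
    if 57 ≤ a - b ∧ a - b ≤ 200 then some (a - b, w a b) else none))

theorem pvFoldl_filterMap (h : Int → Option (Int × Int)) (l : List Int) :
    ∀ c : PySem.Dict Int Int,
      (l.filterMap h).foldl pvUpd c = l.foldl (fun c b => ((h b).map (pvUpd c)).getD c) c := by
  induction l with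
  | nil => intro c; rfl
  | cons x xs ih =>
    intro c
    rw [List.filterMap_cons]
    cases hx : h x with
    | none => simp only [List.foldl_cons, hx, Option.map_none, Option.getD_none, ih]
    | some e => simp only [List.foldl_cons, hx, Option.map_some, Option.getD_some, ih]

theorem pvA_eq_fold (spec : List Int) :
    convolution_map spec =
      ((pvEv spec (fun _ _ => 1)).foldl pvUpd (PySem.Dict.empty : PySem.Dict Int Int)).items := by
  unfold convolution_map
  congr 1
  rw [pvEv, List.foldl_flatMap]
  have hfun : (fun (conv : PySem.Dict Int Int) ma =>
      spec.foldl (fun conv mb =>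
          let diff := ma - mb
          if 57 ≤ diff ∧ diff ≤ 200 then
            match conv.get? diff with
            | some v => conv.insert diff (v + 1)
            | none => conv.insert diff 1
          else conv)
        conv) =
      (fun (c : PySem.Dict Int Int) a =>
        List.foldl pvUpd c (spec.filterMap (fun b =>
          if 57 ≤ a - b ∧ a - b ≤ 200 then some (a - b, (1 : Int)) else none))) := by
    funext c a
    rw [pvFoldl_filterMap]
    refine congrArg (fun f => List.foldl f c spec) (funext fun c' => funext fun b => ?_)
    by_cases hP : 57 ≤ a - b ∧ a - b ≤ 200
    · simp only [if_pos hP, pvUpd, Option.map_some, Option.getD_some]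
      cases hc : c'.get? (a - b) with
      | none =>
        rw [PySem.Dict.getD_eq_get?_getD, hc]
        norm_num
      | some v =>
        rw [PySem.Dict.getD_eq_get?_getD, hc]
        rfl
    · simp only [if_neg hP, Option.map_none, Option.getD_none]
  rw [hfun]

theorem pvB_eq_fold (spec : List Int) :
    convolution_map_alt spec =
      ((pvEv (PySem.List.dedup spec)
          (fun a b => ((spec.count a : Int)) * ((spec.count b : Int)))).foldl pvUpd
        (PySem.Dict.empty : PySem.Dict Int Int)).items := by
  have h0 : convolution_map_alt spec =
      ((PySem.List.dedup spec).foldl (fun conv a =>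
          (PySem.List.dedup spec).foldl (fun conv b =>
              let d := a - b
              if 57 ≤ d ∧ d ≤ 200 then
                conv.insert d (conv.getD d 0 +
                  (spec.foldl (fun cnt x => cnt.insert x (cnt.getD x 0 + 1))
                      (PySem.Dict.empty : PySem.Dict Int Int)).getD a 0 *
                  (spec.foldl (fun cnt x => cnt.insert x (cnt.getD x 0 + 1))
                      (PySem.Dict.empty : PySem.Dict Int Int)).getD b 0)
              else conv)
            conv)
        (PySem.Dict.empty : PySem.Dict Int Int)).items := rfl
  rw [h0, PySem.Dict.foldl_insert_getD_add_one_eq_counter]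
  congr 1
  rw [pvEv, List.foldl_flatMap]
  have hfun : (fun (conv : PySem.Dict Int Int) a =>
      (PySem.List.dedup spec).foldl (fun conv b =>
          let d := a - b
          if 57 ≤ d ∧ d ≤ 200 then
            conv.insert d (conv.getD d 0 +
              (PySem.Dict.counter spec).getD a 0 * (PySem.Dict.counter spec).getD b 0)
          else conv)
        conv) =
      (fun (c : PySem.Dict Int Int) a =>
        List.foldl pvUpd c ((PySem.List.dedup spec).filterMap (fun b =>
          if 57 ≤ a - b ∧ a - b ≤ 200 then
            some (a - b, ((spec.count a : Int)) * ((spec.count b : Int))) else none))) := by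
    funext c a
    rw [pvFoldl_filterMap]
    refine congrArg (fun f => List.foldl f c (PySem.List.dedup spec))
      (funext fun c' => funext fun b => ?_)
    by_cases hP : 57 ≤ a - b ∧ a - b ≤ 200
    · simp only [if_pos hP, pvUpd, PySem.Dict.getD_counter, Option.map_some, Option.getD_some]
    · simp only [if_neg hP, Option.map_none, Option.getD_none]
  rw [hfun]

theorem pvEv_map_fst (l : List Int) (w : Int → Int → Int) :
    (pvEv l w).map Prod.fst =
      l.flatMap (fun a => l.filterMap (fun b =>
        if 57 ≤ a - b ∧ a - b ≤ 200 then some (a - b) else none)) := by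
  simp only [pvEv, List.map_flatMap, List.map_filterMap]
  refine congrArg (fun F => List.flatMap F l)
    (funext fun a => congrArg (fun h => List.filterMap h l) (funext fun b => ?_))
  simp

theorem pvS_eq (spec : List Int) (k : Int) :
    pvS (pvEv spec (fun _ _ => 1)) k =
      pvS (pvEv (PySem.List.dedup spec)
        (fun a b => ((spec.count a : Int)) * ((spec.count b : Int)))) k := by
  have hmemu : ∀ x, x ∈ PySem.List.dedup spec ↔ x ∈ spec := by
    intro x; rw [PySem.List.dedup_eq_ofList]; exact PySem.Set.mem_ofList spec x
  have hnd : (PySem.List.dedup spec).Nodup := by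
    rw [PySem.List.dedup_eq_ofList]; exact PySem.Set.nodup_ofList spec
  rw [pvEv, pvEv, pvS_flatMap, pvS_flatMap]
  have hA : (spec.map (fun a => pvS (spec.filterMap (fun b =>
      if 57 ≤ a - b ∧ a - b ≤ 200 then some (a - b, (1 : Int)) else none)) k)) =
      (spec.map (fun a => if 57 ≤ k ∧ k ≤ 200 then (spec.count (a - k) : Int) else 0)) :=
    List.map_congr_left (fun a _ => pvS_blockA spec a k)
  have hB : ((PySem.List.dedup spec).map (fun a => pvS ((PySem.List.dedup spec).filterMap (fun b =>
      if 57 ≤ a - b ∧ a - b ≤ 200 then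
        some (a - b, ((spec.count a : Int)) * ((spec.count b : Int))) else none)) k)) =
      ((PySem.List.dedup spec).map (fun a =>
        if 57 ≤ k ∧ k ≤ 200 then (spec.count a : Int) * (spec.count (a - k) : Int) else 0)) :=
    List.map_congr_left (fun a _ => pvS_blockB spec a k)
  rw [hA, hB]
  by_cases hK : 57 ≤ k ∧ k ≤ 200
  · simp only [if_pos hK]
    exact pvSum_count (PySem.List.dedup spec) hnd spec
      (fun a => (spec.count (a - k) : Int)) (fun x hx => (hmemu x).mpr hx)
  · simp [if_neg hK]

theorem pvKeys_eq (spec : List Int) :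
    pvDedupS [] ((pvEv spec (fun _ _ => 1)).map Prod.fst) =
      pvDedupS [] ((pvEv (PySem.List.dedup spec)
        (fun a b => ((spec.count a : Int)) * ((spec.count b : Int)))).map Prod.fst) := by
  have huniq : PySem.List.dedup spec = pvDedupS [] spec := by
    rw [PySem.List.dedup_eq_ofList, pvOfList_eq_dedupS]
  rw [pvEv_map_fst, pvEv_map_fst]
  have hinj : ∀ (a b b' d : Int),
      (if 57 ≤ a - b ∧ a - b ≤ 200 then some (a - b) else none) = some d →
      (if 57 ≤ a - b' ∧ a - b' ≤ 200 then some (a - b') else none) = some d → b = b' := by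
    intro a b b' d h1 h2
    by_cases hP : 57 ≤ a - b ∧ a - b ≤ 200
    · rw [if_pos hP] at h1
      by_cases hP' : 57 ≤ a - b' ∧ a - b' ≤ 200
      · rw [if_pos hP'] at h2
        have e1 : a - b = d := Option.some.inj h1
        have e2 : a - b' = d := Option.some.inj h2
        omega
      · rw [if_neg hP'] at h2; cases h2
    · rw [if_neg hP] at h1; cases h1
  have hg : ∀ a, ((PySem.List.dedup spec).filterMap (fun b =>
      if 57 ≤ a - b ∧ a - b ≤ 200 then some (a - b) else none)) =
      pvDedupS [] (spec.filterMap (fun b =>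
        if 57 ≤ a - b ∧ a - b ≤ 200 then some (a - b) else none)) := by
    intro a
    rw [huniq, pvFilterMap_dedupS _ (hinj a) spec []]
    rfl
  rw [pvDedupS_flatMap_congr _ _ hg spec []]
  rw [pvDedupS_flatMap_dedup _ spec [] [] (by intro a ha; cases ha)]
  rw [← huniq]

theorem pv_main (spec : List Int) : convolution_map spec = convolution_map_alt spec := by
  rw [pvA_eq_fold, pvB_eq_fold]
  set EvA := pvEv spec (fun _ _ => 1) with hEvA
  set EvB := pvEv (PySem.List.dedup spec)
      (fun a b => ((spec.count a : Int)) * ((spec.count b : Int))) with hEvB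
  rw [PySem.Dict.items_eq_map_keys _ (pvNodup_keys_foldl_upd EvA) 0,
      PySem.Dict.items_eq_map_keys _ (pvNodup_keys_foldl_upd EvB) 0]
  have hkeys : ∀ evs : List (Int × Int),
      ((evs.foldl pvUpd (PySem.Dict.empty : PySem.Dict Int Int))).keys =
        pvDedupS [] (evs.map Prod.fst) := by
    intro evs
    rw [pvKeys_foldl_upd]
    have : (PySem.Dict.empty : PySem.Dict Int Int).keys = [] := by simp [pysem]
    rw [this, PySem.Set.update_nil_left, pvOfList_eq_dedupS]
  rw [hkeys EvA, hkeys EvB, ← pvKeys_eq spec]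
  refine List.map_congr_left ?_
  intro k _
  rw [pvGetD_foldl_upd, pvGetD_foldl_upd]
  have hemp : (PySem.Dict.empty : PySem.Dict Int Int).getD k 0 = 0 := by simp [pysem]
  rw [hemp, pvS_eq spec k]

-- ===== VERDICT (by name: the statement is the Claim_ definition above) =====
theorem convolution_map_spec : Claim_equal_convolution_map := by
  intro spec _
  unfold Spec_convolution_map
  exact pv_main spec
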